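-- pv_equiv track=rewrite | github.com/njimaMath/Applications | soundQuize/prepare_quiz_data.py | match_pair
-- ===== SOURCE A (Python) =====
-- from typing import Dict, Iterable, List, Tuple
--
-- PUNCTUATION = ".,;:!?\"'()[]{}"
--
-- def normalize_word(word: str) -> str:
--     return word.strip(PUNCTUATION).lower()
--
-- def match_pair(words: List[str], pair: Tuple[str, str]) -> int:
--     """Return the index of a word that matches the pair, or -1."""
--     normalized = [normalize_word(w) for w in words]
--     first, second = pair
--     found_indices = [idx for idx, w in enumerate(normalized) if w in (first, second)]
--     if not found_indices:
--         return -1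
--     found_words = {normalized[idx] for idx in found_indices}
--     # Skip sentences containing both confusing words to avoid ambiguity.
--     if len(found_words) > 1:
--         return -1
--     return found_indices[0] if found_indices else -1
-- ===== SOURCE B (Python) =====
-- from typing import List, Tuple
--
-- PUNCTUATION = ".,;:!?\"'()[]{}"
--
-- def normalize_word(word: str) -> str:
--     return word.strip(PUNCTUATION).lower()
--
-- def match_pair(words: List[str], pair: Tuple[str, str]) -> int:
--     """Return the index of a word that matches the pair, or -1."""
--     # Build a first-occurrence index of normalized words once, then decide
--     # by two dictionary lookups instead of scanning for matches.
--     first_occ = {}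
--     for i, w in enumerate(words):
--         nw = normalize_word(w)
--         if nw not in first_occ:
--             first_occ[nw] = i
--     first, second = pair
--     i1 = first_occ.get(first)
--     i2 = first_occ.get(second)
--     if first != second and i1 is not None and i2 is not None:
--         return -1  # both confusing words occur: ambiguous
--     if i1 is None and i2 is None:
--         return -1
--     return i1 if i1 is not None else i2
-- ===== Notes on version B (the rewrite author's own statement) =====
-- stated objective: alternative
-- what changed: Replaces A's scan-for-matches pipeline (filter matching indices, build a set of matched words, inspect its size) with a first-occurrence hash index built once over normalized words, after which the answer is decided by two dictionary lookups (one per pair element) and a four-way case analysis; no list of match indices or set of matched words exists.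
import Mathlib
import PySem

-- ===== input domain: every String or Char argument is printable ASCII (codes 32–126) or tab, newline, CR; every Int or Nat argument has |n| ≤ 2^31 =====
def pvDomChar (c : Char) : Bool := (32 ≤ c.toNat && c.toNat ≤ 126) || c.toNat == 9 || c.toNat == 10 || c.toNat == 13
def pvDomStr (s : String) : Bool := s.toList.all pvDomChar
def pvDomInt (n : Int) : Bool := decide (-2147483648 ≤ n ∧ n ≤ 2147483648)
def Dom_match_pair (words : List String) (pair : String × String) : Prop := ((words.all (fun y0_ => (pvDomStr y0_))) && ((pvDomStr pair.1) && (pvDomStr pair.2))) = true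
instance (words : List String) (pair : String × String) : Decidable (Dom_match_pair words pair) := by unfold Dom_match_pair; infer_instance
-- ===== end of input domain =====

-- B replaces A's match-scan + matched-word set with a first-occurrence dictionary of
-- normalized words built once, then decides by two lookups (alternative decomposition).

-- shared module helper: normalize_word(w) = w.strip(PUNCTUATION).lower()
def normalize_word (word : String) : String :=
  PySem.Str.lower (PySem.Str.stripChars word ".,;:!?\"'()[]{}")

-- ===== PORT A =====
def match_pair (words : List String) (pair : String × String) : Int :=
  let normalized := words.map normalize_word
  let first := pair.1
  let second := pair.2
  let found_indices :=
    ((PySem.List.enumerate normalized 0).filter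
      (fun p => p.2 == first || p.2 == second)).map (·.1)
  if found_indices = [] then -1
  else
    let found_words : PySem.Set String :=
      PySem.Set.ofList (found_indices.map (fun idx => PySem.List.pyGetD normalized idx ""))
    if 1 < PySem.Set.len found_words then -1
    else if found_indices ≠ [] then PySem.List.pyGetD found_indices 0 (-1) else -1

-- ===== PORT B =====
-- Source B's for-loop: first_occ[nw] = i only when nw is not yet a key
def pvBuildLoop : List String → Int → PySem.Dict String Int → PySem.Dict String Int
  | [], _, d => d
  | w :: ws, i, d =>
    let nw := normalize_word w
    pvBuildLoop ws (i + 1) (if d.contains nw then d else d.insert nw i)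

def match_pair_alt (words : List String) (pair : String × String) : Int :=
  let first_occ := pvBuildLoop words 0 PySem.Dict.empty
  let first := pair.1
  let second := pair.2
  let i1 := first_occ.get? first
  let i2 := first_occ.get? second
  if first ≠ second ∧ i1.isSome ∧ i2.isSome then -1
  else if i1.isNone ∧ i2.isNone then -1
  else match i1 with
    | some i => i
    | none => i2.getD (-1)  -- Python's 'i2' here is never None; getD only for totality

-- ===== PRECONDITION & SPEC =====
def Spec_match_pair (words : List String) (pair : String × String) (out : Int) : Prop := out = match_pair_alt words pair
instance (words : List String) (pair : String × String) (out : Int) : Decidable (Spec_match_pair words pair out) := by unfold Spec_match_pair; infer_instance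

-- ===== CLAIM (what is proved, stated in full; the proofs are below) =====
def Claim_equal_match_pair : Prop := ∀ (words : List String) (pair : String × String), Dom_match_pair words pair → Spec_match_pair words pair (match_pair words pair)

-- ===== LEMMAS AND PROOFS =====

-- the matched (index, normalized word) pairs, starting at index s
def pvMatches (first second : String) (ws : List String) (s : Int) : List (Int × String) :=
  (PySem.List.enumerate (ws.map normalize_word) s).filter
    (fun p => p.2 == first || p.2 == second)

-- the common result expressed on the matches list
def pvSpecFn : List (Int × String) → Int
  | [] => -1
  | (i, w) :: rest => if rest.all (fun p => p.2 == w) then i else -1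

-- B's final case analysis as a function of the two first-occurrence lookups
def pvCombine (first second : String) (i1 i2 : Option Int) : Int :=
  if first ≠ second ∧ i1.isSome ∧ i2.isSome then -1
  else if i1.isNone ∧ i2.isNone then -1
  else match i1 with
    | some i => i
    | none => i2.getD (-1)

-- first index (from s) whose normalized word equals target
def pvFirstIdx? (target : String) : List String → Int → Option Int
  | [], _ => none
  | w :: ws, i => if normalize_word w == target then some i else pvFirstIdx? target ws (i + 1)

theorem pvMatches_nil (first second : String) (s : Int) :
    pvMatches first second [] s = [] := rfl

theorem pvMatches_cons (first second : String) (w : String) (ws : List String) (s : Int) :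
    pvMatches first second (w :: ws) s =
      (if (normalize_word w == first || normalize_word w == second) = true
        then [(s, normalize_word w)] else []) ++ pvMatches first second ws (s + 1) := by
  simp [pvMatches, PySem.List.enumerate_cons, List.filter_cons]
  split_ifs <;> simp_all

-- the dict loop computes first occurrences
theorem pvBuildLoop_get? (ws : List String) :
    ∀ (s : Int) (d : PySem.Dict String Int) (k : String),
      (pvBuildLoop ws s d).get? k = (d.get? k).or (pvFirstIdx? k ws s) := by
  induction ws with
  | nil => intro s d k; simp [pvBuildLoop, pvFirstIdx?]
  | cons w ws ih =>
    intro s d k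
    rw [pvBuildLoop]
    show (pvBuildLoop ws (s + 1)
        (if d.contains (normalize_word w) then d else d.insert (normalize_word w) s)).get? k = _
    rw [ih]
    by_cases hk : normalize_word w = k
    · subst hk
      by_cases hc : d.contains (normalize_word w)
      · rw [if_pos hc]
        have hs : (d.get? (normalize_word w)).isSome := by
          rw [← PySem.Dict.contains_eq_isSome_get?]; exact hc
        obtain ⟨v, hv⟩ := Option.isSome_iff_exists.mp hs
        simp [pvFirstIdx?, hv]
      · rw [if_neg hc]
        have hnone : d.get? (normalize_word w) = none := by
          rw [PySem.Dict.get?_eq_none_iff_contains]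
          simpa using hc
        simp [pvFirstIdx?, PySem.Dict.get?_insert_self, hnone]
    · have hgk : (if d.contains (normalize_word w) then d
          else d.insert (normalize_word w) s).get? k = d.get? k := by
        split_ifs with hc
        · rfl
        · rw [PySem.Dict.get?_insert]
          rw [if_neg (fun h => hk h.symm)]
      rw [hgk]
      have hne : (normalize_word w == k) = false := by simp [hk]
      simp [pvFirstIdx?, hne]

theorem match_pair_alt_eq (words : List String) (pair : String × String) :
    match_pair_alt words pair =
      pvCombine pair.1 pair.2 (pvFirstIdx? pair.1 words 0) (pvFirstIdx? pair.2 words 0) := by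
  unfold match_pair_alt pvCombine
  simp only [pvBuildLoop_get?, PySem.Dict.get?_empty, Option.none_or]

-- if first ≠ second, the matches are all 'first' iff 'second' never occurs
theorem pvAll_first_iff (first second : String) (hne : first ≠ second) (ws : List String) :
    ∀ (t : Int),
      ((pvMatches first second ws t).all (fun p => p.2 == first) = true ↔
        pvFirstIdx? second ws t = none) := by
  induction ws with
  | nil => intro t; simp [pvMatches_nil, pvFirstIdx?]
  | cons w ws ih =>
    intro t
    rw [pvMatches_cons, pvFirstIdx?]
    by_cases h2 : normalize_word w = second
    · have hb2 : (normalize_word w == second) = true := by simp [h2]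
      have hb1 : (normalize_word w == first) = false := by
        simp [h2]; exact fun h => hne h.symm
      simp [hb1, hb2]
    · have hb2 : (normalize_word w == second) = false := by simp [h2]
      by_cases h1 : normalize_word w = first
      · have hb1 : (normalize_word w == first) = true := by simp [h1]
        simpa [hb1, hb2] using ih (t + 1)
      · have hb1 : (normalize_word w == first) = false := by simp [h1]
        simpa [hb1, hb2] using ih (t + 1)

-- symmetric version for 'second'
theorem pvAll_second_iff (first second : String) (hne : first ≠ second) (ws : List String) :
    ∀ (t : Int),
      ((pvMatches first second ws t).all (fun p => p.2 == second) = true ↔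
        pvFirstIdx? first ws t = none) := by
  induction ws with
  | nil => intro t; simp [pvMatches_nil, pvFirstIdx?]
  | cons w ws ih =>
    intro t
    rw [pvMatches_cons, pvFirstIdx?]
    by_cases h1 : normalize_word w = first
    · have hb1 : (normalize_word w == first) = true := by simp [h1]
      have hb2 : (normalize_word w == second) = false := by
        simp [h1]; exact fun h => hne h
      simp [hb1, hb2]
    · have hb1 : (normalize_word w == first) = false := by simp [h1]
      by_cases h2 : normalize_word w = second
      · have hb2 : (normalize_word w == second) = true := by simp [h2]
        simpa [hb1, hb2] using ih (t + 1)
      · have hb2 : (normalize_word w == second) = false := by simp [h2]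
        simpa [hb1, hb2] using ih (t + 1)

-- every matched word is first or second
theorem pvMatches_word (first second : String) (ws : List String) (t : Int)
    (p : Int × String) (hp : p ∈ pvMatches first second ws t) :
    p.2 = first ∨ p.2 = second := by
  unfold pvMatches at hp
  have := List.of_mem_filter hp
  simpa using this

-- the bridge: pvSpecFn on the matches equals B's combine of the two first indices
theorem pvBridge (first second : String) (ws : List String) :
    ∀ (t : Int),
      pvSpecFn (pvMatches first second ws t) =
        pvCombine first second (pvFirstIdx? first ws t) (pvFirstIdx? second ws t) := by
  induction ws with
  | nil => intro t; simp [pvMatches_nil, pvFirstIdx?, pvSpecFn, pvCombine]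
  | cons w ws ih =>
    intro t
    rw [pvMatches_cons, pvFirstIdx?, pvFirstIdx?]
    by_cases heq : first = second
    · subst heq
      by_cases h1 : normalize_word w = first
      · have hb1 : (normalize_word w == first) = true := by simp [h1]
        have hall : (pvMatches first first ws (t + 1)).all (fun p => p.2 == normalize_word w)
            = true := by
          rw [List.all_eq_true]
          intro p hp
          rcases pvMatches_word first first ws (t + 1) p hp with h | h <;> simp [h, h1]
        simp [hb1, pvSpecFn, pvCombine, hall]
      · have hb1 : (normalize_word w == first) = false := by simp [h1]
        simpa [hb1] using ih (t + 1)
    · by_cases h1 : normalize_word w = first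
      · have hb1 : (normalize_word w == first) = true := by simp [h1]
        have hb2 : (normalize_word w == second) = false := by
          simp [h1]; exact fun h => heq h
        rcases hfi : pvFirstIdx? second ws (t + 1) with _ | j
        · have hall := (pvAll_first_iff first second heq ws (t + 1)).mpr hfi
          rw [h1] at *
          simp [hb1, hb2, pvSpecFn, pvCombine, hall, heq]
        · have hall : ((pvMatches first second ws (t + 1)).all
              (fun p => p.2 == first)) = false := by
            rcases hc : (pvMatches first second ws (t + 1)).all (fun p => p.2 == first) with _ | _
            · rfl
            · rw [pvAll_first_iff first second heq ws (t + 1)] at hc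
              simp [hc] at hfi
          rw [h1] at *
          simp [hb1, hb2, pvSpecFn, pvCombine, hall, heq]
      · have hb1 : (normalize_word w == first) = false := by simp [h1]
        by_cases h2 : normalize_word w = second
        · have hb2 : (normalize_word w == second) = true := by simp [h2]
          have heq' : ¬ second = first := fun h => heq h.symm
          rcases hfi : pvFirstIdx? first ws (t + 1) with _ | j
          · have hall := (pvAll_second_iff first second heq ws (t + 1)).mpr hfi
            rw [h2] at *
            simp [hb1, hb2, pvSpecFn, pvCombine, hall, heq, heq', hfi]
          · have hall : ((pvMatches first second ws (t + 1)).all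
                (fun p => p.2 == second)) = false := by
              rcases hc : (pvMatches first second ws (t + 1)).all (fun p => p.2 == second) with _ | _
              · rfl
              · rw [pvAll_second_iff first second heq ws (t + 1)] at hc
                simp [hc] at hfi
            rw [h2] at *
            simp [hb1, hb2, pvSpecFn, pvCombine, hall, heq, heq', hfi]
        · have hb2 : (normalize_word w == second) = false := by simp [h2]
          simpa [hb1, hb2] using ih (t + 1)

-- every matched pair looks up to its own word
theorem pvMatches_get (first second : String) (ws : List String) (p : Int × String)
    (hp : p ∈ pvMatches first second ws 0) :
    PySem.List.pyGetD (ws.map normalize_word) p.1 "" = p.2 := by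
  unfold pvMatches at hp
  have hmem := List.mem_of_mem_filter hp
  rw [PySem.List.mem_enumerate_iff] at hmem
  obtain ⟨k, hk, rfl⟩ := hmem
  have hk' : k < ws.length := by simpa using hk
  simp [PySem.List.pyGetD_natCast, List.getElem?_eq_getElem hk']

-- the indices of the matches, looked up, give back the matched words
theorem pvMatches_map_lookup (first second : String) (ws : List String) :
    ((pvMatches first second ws 0).map (·.1)).map
        (fun idx => PySem.List.pyGetD (ws.map normalize_word) idx "") =
      (pvMatches first second ws 0).map (·.2) := by
  rw [List.map_map]
  apply List.map_congr_left
  intro p hp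
  exact pvMatches_get first second ws p hp

-- the PySem.Set of a nonempty constant-tail list is a singleton iff all tail words equal the head
theorem pvFoldl_add_const {α : Type} [DecidableEq α] (w : α) (ws : List α)
    (h : ∀ x ∈ ws, x = w) : ws.foldl PySem.Set.add [w] = [w] := by
  induction ws with
  | nil => rfl
  | cons x xs ih =>
    have hx : x = w := h x (by simp)
    have : PySem.Set.add [w] x = [w] := by
      subst hx; simp [PySem.Set.add, PySem.Set.contains]
    simp only [List.foldl_cons, this]
    exact ih (fun y hy => h y (by simp [hy]))

theorem pvSet_len_le_one (w : String) (ws : List String)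
    (h : ∀ x ∈ ws, x = w) :
    PySem.Set.ofList (w :: ws) = [w] := by
  rw [PySem.Set.ofList_eq_foldl]
  simp only [List.foldl_cons]
  rw [show PySem.Set.add ([] : List String) w = [w] from rfl]
  exact pvFoldl_add_const w ws h

theorem pvSet_len_gt_one (w : String) (ws : List String)
    (h : ¬ ∀ x ∈ ws, x = w) :
    1 < PySem.Set.len (PySem.Set.ofList (w :: ws)) := by
  push_neg at h
  obtain ⟨x, hx, hxw⟩ := h
  have hw : w ∈ PySem.Set.ofList (w :: ws) := by rw [PySem.Set.mem_ofList]; simp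
  have hxm : x ∈ PySem.Set.ofList (w :: ws) := by rw [PySem.Set.mem_ofList]; simp [hx]
  have hnd : (PySem.Set.ofList (w :: ws)).Nodup := PySem.Set.nodup_ofList _
  have hsub : ({w, x} : Finset String) ⊆ (PySem.Set.ofList (w :: ws)).toFinset := by
    intro y hy
    simp only [Finset.mem_insert, Finset.mem_singleton] at hy
    rcases hy with rfl | rfl <;> simp [List.mem_toFinset, hw, hxm]
  have hcard : 2 ≤ (PySem.Set.ofList (w :: ws)).toFinset.card := by
    have hle := Finset.card_le_card hsub
    rwa [Finset.card_pair (fun hh => hxw hh.symm)] at hle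
  have hlen : 2 ≤ (PySem.Set.ofList (w :: ws)).length := by
    rwa [List.toFinset_card_of_nodup hnd] at hcard
  simp only [PySem.Set.len]
  omega

-- A also computes pvSpecFn of the matches
theorem match_pair_eq (words : List String) (pair : String × String) :
    match_pair words pair = pvSpecFn (pvMatches pair.1 pair.2 words 0) := by
  simp only [match_pair]
  have hfi : ((PySem.List.enumerate (words.map normalize_word) 0).filter
      (fun p => p.2 == pair.1 || p.2 == pair.2)).map (·.1)
      = (pvMatches pair.1 pair.2 words 0).map (·.1) := rfl
  rw [hfi]
  rcases hM : pvMatches pair.1 pair.2 words 0 with _ | ⟨⟨i, w⟩, rest⟩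
  · simp [pvSpecFn]
  · have hlookup := pvMatches_map_lookup pair.1 pair.2 words
    rw [hM] at hlookup
    rw [hlookup]
    simp only [List.map_cons]
    rw [if_neg (by simp)]
    have hiff : (rest.all (fun p => p.2 == w) = true) ↔
        ∀ x ∈ rest.map (fun p => p.2), x = w := by
      simp [List.all_eq_true]
      exact ⟨fun h x i hi => h i x hi, fun h a b hb => h b a hb⟩
    by_cases hall : ∀ x ∈ rest.map (fun p => p.2), x = w
    · rw [pvSet_len_le_one w _ hall]
      rw [if_neg (by simp [PySem.Set.len])]
      rw [if_pos (by simp)]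
      have htrue : rest.all (fun p => p.2 == w) = true := hiff.mpr hall
      simp [pvSpecFn, htrue, PySem.List.pyGetD]
    · rw [if_pos (pvSet_len_gt_one w _ hall)]
      have hfalse : rest.all (fun p => p.2 == w) = false := by
        rcases hcase : rest.all (fun p => p.2 == w) with _ | _
        · rfl
        · exact absurd (hiff.mp hcase) hall
      simp [pvSpecFn, hfalse]

-- ===== VERDICT (by name: the statement is the Claim_ definition above) =====
theorem match_pair_spec : Claim_equal_match_pair := by
  intro words pair _
  unfold Spec_match_pair
  rw [match_pair_eq, match_pair_alt_eq, pvBridge]
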